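-- pv_equiv track=rewrite | github.com/udovin/MogilevTasks2019 | contests/week2/day6/tasks.py | h_solution
-- ===== SOURCE A (Python) =====
-- def h_solution(n, s):
--     ans = ""
--     temp = ""
--     for i in range(n):
--         temp += sorted(s[i])[0]
--     for x in sorted(temp):
--         ans += x
--     return ans
-- ===== SOURCE B (Python) =====
-- def h_solution(n, s):
--     counts = [0] * 128
--     for i in range(n):
--         counts[ord(min(s[i]))] += 1
--     out = []
--     for code in range(128):
--         out.append(chr(code) * counts[code])
--     return "".join(out)
-- ===== Notes on version B (the rewrite author's own statement) =====
-- stated objective: alternative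
-- what changed: B extracts each string's minimum with min() instead of sorting the string, and replaces the final comparison sort by a counting sort over ASCII code points (frequency array, then emit each character count times in code order).
import Mathlib
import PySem

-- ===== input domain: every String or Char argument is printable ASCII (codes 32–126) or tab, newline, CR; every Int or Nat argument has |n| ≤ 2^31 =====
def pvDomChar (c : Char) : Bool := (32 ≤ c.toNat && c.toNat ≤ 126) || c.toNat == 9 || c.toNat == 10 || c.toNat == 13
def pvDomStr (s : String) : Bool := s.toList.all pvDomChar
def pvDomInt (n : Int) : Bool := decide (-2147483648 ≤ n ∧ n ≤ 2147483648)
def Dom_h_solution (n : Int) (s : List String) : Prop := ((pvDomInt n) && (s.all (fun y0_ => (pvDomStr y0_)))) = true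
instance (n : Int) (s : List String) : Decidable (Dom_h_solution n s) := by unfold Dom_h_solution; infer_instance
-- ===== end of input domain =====

-- B extracts each minimum with min() instead of sorting the string, and replaces the final
-- comparison sort by a counting sort over ASCII code points (alternative algorithm).

-- ===== PORT A =====
def h_solution (n : Int) (s : List String) : String :=
  let temp := (PySem.List.pyRange 0 n 1).foldl
    (fun (temp : List Char) i =>
      temp ++ [PySem.List.pyGetD (PySem.List.sorted (PySem.List.pyGetD s i "").toList (fun c => c) false) 0 ' '])
    []
  String.ofList ((PySem.List.sorted temp (fun c => c) false).foldl (fun ans x => ans ++ [x]) [])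

-- ===== PORT B =====
def h_solution_alt (n : Int) (s : List String) : String :=
  let counts := (PySem.List.pyRange 0 n 1).foldl
    (fun (counts : List Int) i =>
      let idx : Int := (((PySem.List.min? (PySem.List.pyGetD s i "").toList (fun c => c)).getD ' ').toNat : Int)
      PySem.List.pySetD counts idx (PySem.List.pyGetD counts idx 0 + 1))
    (List.replicate 128 0)
  String.ofList ((PySem.List.pyRange 0 128 1).foldl
    (fun (out : List Char) code =>
      out ++ List.replicate (PySem.List.pyGetD counts code 0).toNat (Char.ofNat code.toNat))
    [])

-- ===== PRECONDITION & SPEC =====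
-- Pre_ excludes exactly the inputs where Python A raises: n > len(s) (IndexError on s[i]) or an
-- empty string among the first n (IndexError on sorted(s[i])[0]).
def Pre_h_solution (n : Int) (s : List String) : Prop :=
  n ≤ (s.length : Int) ∧ ∀ t ∈ s.take n.toNat, t ≠ ""
instance (n : Int) (s : List String) : Decidable (Pre_h_solution n s) := by
  unfold Pre_h_solution; infer_instance

def pvWitness_h_solution : Int × List String := (2, ["ba", "c"])

def Spec_h_solution (n : Int) (s : List String) (out : String) : Prop := out = h_solution_alt n s
instance (n : Int) (s : List String) (out : String) : Decidable (Spec_h_solution n s out) := by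
  unfold Spec_h_solution; infer_instance

-- ===== CLAIM (what is proved, stated in full; the proofs are below) =====
def Claim_equal_h_solution : Prop := ∀ (n : Int) (s : List String), Dom_h_solution n s → Pre_h_solution n s → Spec_h_solution n s (h_solution n s)

-- ===== LEMMAS AND PROOFS =====

-- the minimum character both sides extract from one string (default ' ' for the unreachable empty case)
def pvMinChar (t : String) : Char := (PySem.List.min? t.toList (fun c => c)).getD ' '

-- the list of minima of the first k strings
def pvMins (s : List String) (k : Nat) : List Char :=
  (List.range k).map (fun i => pvMinChar (s.getD i ""))

theorem char_toNat_ofNat_lt {c : Nat} (h : c < 128) : (Char.ofNat c).toNat = c := by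
  rw [Char.toNat_ofNat]; simp [Nat.isValidChar]; omega

theorem pvRange_toNat (n : Int) :
    PySem.List.pyRange 0 n 1 = PySem.List.pyRange 0 ((n.toNat : Nat) : Int) 1 := by
  by_cases h : 0 ≤ n
  · rw [Int.toNat_of_nonneg h]
  · rw [PySem.List.pyRange_one_eq_nil (by omega), PySem.List.pyRange_one_eq_nil (by omega)]

theorem head_sorted_eq_min (cs : List Char) :
    PySem.List.pyGetD (PySem.List.sorted cs (fun c => c) false) 0 ' '
      = (PySem.List.min? cs (fun c => c)).getD ' ' := by
  rcases hcs : cs with _ | ⟨a, t⟩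
  · rfl
  rw [← hcs]
  have hne : cs ≠ [] := by simp [hcs]
  have hs : PySem.List.sorted cs (fun c => c) false ≠ [] := by
    simpa [PySem.List.sorted_eq_nil_iff] using hne
  rcases hsort : PySem.List.sorted cs (fun c => c) false with _ | ⟨m, rest⟩
  · exact absurd hsort hs
  rcases hmin : PySem.List.min? cs (fun c => c) with _ | m'
  · exact absurd ((PySem.List.min?_eq_none_iff cs _).mp hmin) hne
  have hm_mem : m ∈ cs := by
    have : m ∈ PySem.List.sorted cs (fun c => c) false := by simp [hsort]
    exact (PySem.List.mem_sorted cs _ false m).mp this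
  have hm'_mem : m' ∈ cs := PySem.List.min?_mem hmin
  have h1 : m' ≤ m := PySem.List.min?_isMin hmin m hm_mem
  have h2 : m ≤ m' := PySem.List.key_head_sorted_le cs _ hsort m' hm'_mem
  simp [PySem.List.pyGetD_zero_cons, le_antisymm h2 h1]

theorem mins_code_lt (s : List String) (hdom : s.all pvDomStr = true) (i : Nat) :
    (pvMinChar (s.getD i "")).toNat < 128 := by
  unfold pvMinChar
  rcases hmin : PySem.List.min? (s.getD i "").toList (fun c => c) with _ | m
  · decide
  have hm : m ∈ (s.getD i "").toList := PySem.List.min?_mem hmin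
  by_cases hi : i < s.length
  · have hmem : s.getD i "" ∈ s := by
      rw [List.getD_eq_getElem s "" hi]
      exact List.getElem_mem hi
    have h1 := (List.all_eq_true.mp hdom) _ hmem
    have hc := (List.all_eq_true.mp h1) _ hm
    simp only [pvDomChar, Bool.or_eq_true, Bool.and_eq_true, decide_eq_true_eq, beq_iff_eq] at hc
    simp only [Option.getD_some]
    omega
  · have h0 : s.getD i "" = "" := List.getD_eq_default s "" (le_of_not_gt hi)
    rw [h0] at hm
    simp at hm

-- A's first loop collects exactly the minima of the first k strings
theorem temp_fold (s : List String) (k : Nat) :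
    (PySem.List.pyRange 0 (k : Int) 1).foldl
      (fun (temp : List Char) i =>
        temp ++ [PySem.List.pyGetD (PySem.List.sorted (PySem.List.pyGetD s i "").toList (fun c => c) false) 0 ' '])
      []
    = pvMins s k := by
  induction k with
  | zero =>
    rw [PySem.List.pyRange_one_eq_nil (by norm_num)]
    simp [pvMins]
  | succ k ih =>
    have hcast : ((k+1 : Nat) : Int) = (k : Int) + 1 := by push_cast; ring
    rw [hcast, PySem.List.pyRange_one_succ_right (by positivity), List.foldl_append, ih]
    simp only [List.foldl_cons, List.foldl_nil]
    rw [head_sorted_eq_min, PySem.List.pyGetD_natCast]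
    simp [pvMins, List.range_succ, pvMinChar]

-- B's first loop maintains the frequency table of those minima
theorem counts_fold (s : List String) (k : Nat)
    (hcode : ∀ i, i < k → (pvMinChar (s.getD i "")).toNat < 128) :
    (PySem.List.pyRange 0 (k : Int) 1).foldl
      (fun (counts : List Int) i =>
        let idx : Int := (((PySem.List.min? (PySem.List.pyGetD s i "").toList (fun c => c)).getD ' ').toNat : Int)
        PySem.List.pySetD counts idx (PySem.List.pyGetD counts idx 0 + 1))
      (List.replicate 128 0)
    = (List.range 128).map (fun c => (((pvMins s k).count (Char.ofNat c)) : Int)) := by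
  induction k with
  | zero =>
    rw [PySem.List.pyRange_one_eq_nil (by norm_num)]
    simp [pvMins]
  | succ k ih =>
    have hcode' : ∀ i, i < k → (pvMinChar (s.getD i "")).toNat < 128 := fun i hi => hcode i (Nat.lt_succ_of_lt hi)
    have hcast : ((k+1 : Nat) : Int) = (k : Int) + 1 := by push_cast; ring
    rw [hcast, PySem.List.pyRange_one_succ_right (by positivity), List.foldl_append, ih hcode']
    simp only [List.foldl_cons, List.foldl_nil]
    set ch := pvMinChar (s.getD k "") with hch
    have hidx : ch.toNat < 128 := hcode k (Nat.lt_succ_self k)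
    have hminch : ((PySem.List.min? (PySem.List.pyGetD s (k : Int) "").toList (fun c => c)).getD ' ') = ch := by
      rw [PySem.List.pyGetD_natCast]; rfl
    simp only [hminch]
    have hM : PySem.List.pyGetD ((List.range 128).map (fun c => (((pvMins s k).count (Char.ofNat c)) : Int))) ((ch.toNat : Nat) : Int) 0
          = ((pvMins s k).count (Char.ofNat ch.toNat) : Int) := by
      rw [PySem.List.pyGetD_natCast]
      rw [List.getD_eq_getElem _ _ (by simpa using hidx)]
      simp
    rw [PySem.List.pySetD_natCast, hM]
    have hmins : pvMins s (k+1) = pvMins s k ++ [ch] := by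
      simp [pvMins, List.range_succ, hch]
    apply List.ext_getElem
    · simp
    intro j hj hj'
    have hj128 : j < 128 := by simpa using hj'
    rw [List.getElem_set, List.getElem_map, List.getElem_range, hmins]
    simp only [List.getElem_map, List.getElem_range]
    by_cases hjc : ch.toNat = j
    · simp only [← hjc, Char.ofNat_toNat]
      simp [List.count_append]
    · simp only [if_neg hjc]
      have hne : Char.ofNat j ≠ ch := by
        intro he
        have hje : j = ch.toNat := by rw [← he, char_toNat_ofNat_lt hj128]
        exact hjc hje.symm
      rw [List.count_append]
      simp [List.count_singleton]
      intro h
      exact absurd h.symm hne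

-- B's second loop emits each code point its-count times, in code order
theorem out_fold_aux (cnts : Nat → Nat) (m : Nat) (hm : m ≤ 128) (acc : List Char) :
    (PySem.List.pyRange 0 (m : Int) 1).foldl
      (fun (out : List Char) code =>
        out ++ List.replicate (PySem.List.pyGetD ((List.range 128).map (fun c => ((cnts c : Int)))) code 0).toNat (Char.ofNat code.toNat))
      acc
    = acc ++ (List.range m).flatMap (fun c => List.replicate (cnts c) (Char.ofNat c)) := by
  induction m generalizing acc with
  | zero =>
    rw [PySem.List.pyRange_one_eq_nil (by norm_num)]
    simp
  | succ m ih =>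
    have hm' : m ≤ 128 := Nat.le_of_succ_le hm
    have hcast : ((m+1 : Nat) : Int) = (m : Int) + 1 := by push_cast; ring
    rw [hcast, PySem.List.pyRange_one_succ_right (by positivity), List.foldl_append, ih hm']
    simp only [List.foldl_cons, List.foldl_nil]
    have hget : PySem.List.pyGetD ((List.range 128).map (fun c => ((cnts c : Int)))) ((m : Nat) : Int) 0 = (cnts m : Int) := by
      rw [PySem.List.pyGetD_natCast]
      rw [List.getD_eq_getElem _ _ (by simpa using lt_of_lt_of_le (Nat.lt_succ_self m) hm)]
      simp
    rw [hget]
    simp [List.range_succ, List.flatMap_append]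

-- counting sort is sorting: emitting each code its-count times in code order IS sorted()
theorem sum_ite_range (n m : Nat) (A : Nat) :
    ((List.range n).map (fun c => if c = m then A else 0)).sum
      = if m < n then A else 0 := by
  induction n with
  | zero => simp
  | succ n ih =>
    rw [List.range_succ]
    simp only [List.map_append, List.sum_append, ih, List.map_cons, List.map_nil,
      List.sum_cons, List.sum_nil]
    by_cases h : m < n
    · have h2 : n ≠ m := by omega
      have h3 : m < n + 1 := by omega
      simp [h, h2, h3]
    · by_cases h2 : n = m
      · subst h2; simp [h]
      · have h3 : ¬ m < n + 1 := by omega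
        simp [h, h2, h3]

theorem counting_sorted (L : List Char) (hL : ∀ x ∈ L, x.toNat < 128) :
    PySem.List.sorted L (fun c => c) false
      = (List.range 128).flatMap (fun c => List.replicate (L.count (Char.ofNat c)) (Char.ofNat c)) := by
  apply PySem.List.sorted_id_eq_of_perm_of_pairwise
  · rw [List.perm_iff_count]
    intro x
    rw [List.count_flatMap]
    have hmap : (List.map (List.count x ∘ fun c => List.replicate (L.count (Char.ofNat c)) (Char.ofNat c)) (List.range 128))
        = (List.range 128).map (fun c => if c = x.toNat then L.count x else 0) := by
      apply List.map_congr_left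
      intro c hc
      have hc128 : c < 128 := List.mem_range.mp hc
      simp only [Function.comp_apply, List.count_replicate, beq_iff_eq]
      by_cases he : Char.ofNat c = x
      · have : c = x.toNat := by rw [← he, char_toNat_ofNat_lt hc128]
        simp [he, this]
      · have : c ≠ x.toNat := by
          intro hcx
          exact he (by rw [hcx, Char.ofNat_toNat])
        simp [he, this]
    rw [hmap, sum_ite_range]
    by_cases hx : x.toNat < 128
    · simp [hx]
    · have : x ∉ L := fun hmem => hx (hL x hmem)
      simp [hx, List.count_eq_zero_of_not_mem this]
  · rw [List.pairwise_flatMap]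
    constructor
    · intro a _
      rw [List.pairwise_replicate]
      right; exact le_refl _
    · apply List.Pairwise.imp_of_mem ?_ List.pairwise_lt_range
      intro c1 c2 h1 h2 hlt x hx y hy
      have hx' := List.eq_of_mem_replicate hx
      have hy' := List.eq_of_mem_replicate hy
      subst hx'; subst hy'
      have e1 := char_toNat_ofNat_lt (List.mem_range.mp h1)
      have e2 := char_toNat_ofNat_lt (List.mem_range.mp h2)
      have : (Char.ofNat c1).toNat ≤ (Char.ofNat c2).toNat := by omega
      rw [Char.le_def, UInt32.le_iff_toNat_le]
      exact this

-- ===== VERDICT (by name: the statement is the Claim_ definition above) =====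
theorem h_solution_spec : Claim_equal_h_solution := by
  intro n s hdom hpre
  have hdoms : s.all pvDomStr = true := by
    unfold Dom_h_solution at hdom
    simp only [Bool.and_eq_true] at hdom
    exact hdom.2
  have hcode : ∀ i, i < n.toNat → (pvMinChar (s.getD i "")).toNat < 128 :=
    fun i _ => mins_code_lt s hdoms i
  have hL : ∀ x ∈ pvMins s n.toNat, x.toNat < 128 := by
    intro x hx
    unfold pvMins at hx
    rcases List.mem_map.mp hx with ⟨i, _, rfl⟩
    exact mins_code_lt s hdoms i
  unfold Spec_h_solution h_solution h_solution_alt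
  rw [pvRange_toNat n]
  rw [temp_fold s n.toNat, counts_fold s n.toNat hcode]
  simp only []
  rw [PySem.List.foldl_append_singleton_eq_self]
  have h128 : PySem.List.pyRange 0 128 1 = PySem.List.pyRange 0 ((128 : Nat) : Int) 1 := by norm_num
  rw [h128, out_fold_aux (fun c => (pvMins s n.toNat).count (Char.ofNat c)) 128 (le_refl _) []]
  rw [counting_sorted (pvMins s n.toNat) hL]
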